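-- pv_equiv track=rewrite | github.com/DanieIoZ/Studies_git | python/4/pd.py | diag_size
-- ===== SOURCE A (Python) =====
-- def diag_size(r,c,data):
--     sum = 1
--     rising = [True,True]
--     falling = [True, True]
--     for i in range (1,min(len(data), len(data[0]))):
-- #-----------------------------------------------------------------------------------------------------#
--         if rising[0] and (r-i >= 0) and (c+i < len(data[0])) and (data[r-i][c+i] == data[r][c]):
--             sum += 1
--         else:
--             rising[0] = False
--         if rising[1] and (r+i < len(data)) and (c-i >= 0) and (data[r+i][c-i] == data[r][c]):
--             sum += 1
--         else:
--             rising[1] = False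
-- #-----------------------------------------------------------------------------------------------------#
--         if falling[0] and (r-i >= 0) and (c-i >= 0) and (data[r-i][c-i] == data[r][c]):
--             sum += 1
--         else:
--             falling[0] = False
--         if falling[1] and (r+i < len(data)) and (c+i < len(data[0])) and (data[r+i][c+i] == data[r][c]):
--             sum += 1
--         else:
--             falling[1] = False
-- #-----------------------------------------------------------------------------------------------------#
--     return sum
-- ===== SOURCE B (Python) =====
-- def diag_size(r, c, data):
--     rows = len(data)
--     cols = len(data[0])
--     if rows < 2 or cols < 2:
--         return 1  # no cell of such a grid has a diagonal neighbour
--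
--     def walk(dr, dc):
--         n = 0
--         nr, nc = r + dr, c + dc
--         while 0 <= nr < rows and 0 <= nc < cols and data[nr][nc] == data[r][c]:
--             n += 1
--             nr += dr
--             nc += dc
--         return n
--
--     return 1 + walk(-1, 1) + walk(1, -1) + walk(-1, -1) + walk(1, 1)
-- ===== Notes on version B (the rewrite author's own statement) =====
-- stated objective: simpler
-- what changed: Replaces the single shared loop over i=1..min(rows,cols)-1 with four mutable still-going flags by one directional helper that walks outward from (r,c) along a step (dr,dc) while the cell matches, summed over the four diagonal directions (with an early return 1 when the grid has fewer than 2 rows or columns, where no diagonal neighbour exists).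
-- outside the precondition, e.g. on diag_size(-2, 1, [['a', 'a'], ['a', 'a']]): A returns 2, B returns 1; on diag_size(-1, -1, [['b', 'a', 'b'], ['a', 'b', 'b'], ['b', 'b']]): A returns 3, B raises IndexError
import Mathlib
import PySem

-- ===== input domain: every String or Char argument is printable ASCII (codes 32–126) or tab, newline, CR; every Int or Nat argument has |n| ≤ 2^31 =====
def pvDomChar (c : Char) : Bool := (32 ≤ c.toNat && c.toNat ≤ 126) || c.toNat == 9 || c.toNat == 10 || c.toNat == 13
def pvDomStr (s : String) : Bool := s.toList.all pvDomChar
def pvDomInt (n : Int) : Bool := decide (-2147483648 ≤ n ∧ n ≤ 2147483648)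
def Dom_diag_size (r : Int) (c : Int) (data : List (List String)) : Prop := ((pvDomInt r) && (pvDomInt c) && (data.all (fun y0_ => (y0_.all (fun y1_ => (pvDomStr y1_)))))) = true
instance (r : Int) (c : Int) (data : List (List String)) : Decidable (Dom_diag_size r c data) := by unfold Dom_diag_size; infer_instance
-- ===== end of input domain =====

-- B replaces A's single shared loop with four stateful flags by one directional
-- walk helper summed over the four diagonal steps (objective: simpler).

-- ===== PORT A =====
-- data[i][j] as an Option (none where Python would raise IndexError); Pre_ keeps all uses in range
def pvCell (data : List (List String)) (i j : Int) : Option String :=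
  (PySem.List.pyGet? data i).bind fun row => PySem.List.pyGet? row j

-- the body of A's for-loop, literally: state (sum, rising0, rising1, falling0, falling1)
def pvStepA (rows cols r c : Int) (data : List (List String))
    (st : Int × Bool × Bool × Bool × Bool) (i : Int) : Int × Bool × Bool × Bool × Bool :=
  let (s, r0, r1, f0, f1) := st
  let (s, r0) := if r0 && decide (r - i ≥ 0) && decide (c + i < cols) &&
      (pvCell data (r - i) (c + i) == pvCell data r c) then (s + 1, r0) else (s, false)
  let (s, r1) := if r1 && decide (r + i < rows) && decide (c - i ≥ 0) &&
      (pvCell data (r + i) (c - i) == pvCell data r c) then (s + 1, r1) else (s, false)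
  let (s, f0) := if f0 && decide (r - i ≥ 0) && decide (c - i ≥ 0) &&
      (pvCell data (r - i) (c - i) == pvCell data r c) then (s + 1, f0) else (s, false)
  let (s, f1) := if f1 && decide (r + i < rows) && decide (c + i < cols) &&
      (pvCell data (r + i) (c + i) == pvCell data r c) then (s + 1, f1) else (s, false)
  (s, r0, r1, f0, f1)

def diag_size (r : Int) (c : Int) (data : List (List String)) : Int :=
  let rows : Int := data.length
  let cols : Int := ((PySem.List.pyGet? data 0).getD []).length
  ((PySem.List.pyRange 1 (min rows cols) 1).foldl
    (pvStepA rows cols r c data) (1, true, true, true, true)).1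

-- ===== PORT B =====
-- B's while-loop: walk from (nr, nc) by (dr, dc) while in bounds and equal to v.
-- fuel only makes the recursion structural; it never truncates (a walk takes < rows + 1 steps).
def pvWalk (data : List (List String)) (rows cols : Int) (v : Option String)
    (dr dc : Int) : Nat → Int → Int → Int
  | 0, _, _ => 0
  | fuel + 1, nr, nc =>
    if decide (0 ≤ nr) && decide (nr < rows) && decide (0 ≤ nc) && decide (nc < cols) &&
        (pvCell data nr nc == v) then
      1 + pvWalk data rows cols v dr dc fuel (nr + dr) (nc + dc)
    else 0

def diag_size_alt (r : Int) (c : Int) (data : List (List String)) : Int :=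
  let rows : Int := data.length
  let cols : Int := ((PySem.List.pyGet? data 0).getD []).length
  if rows < 2 ∨ cols < 2 then 1  -- no cell of such a grid has a diagonal neighbour
  else
    let fuel : Nat := data.length + 1
    let w := fun (dr dc : Int) =>
      pvWalk data rows cols (pvCell data r c) dr dc fuel (r + dr) (c + dc)
    1 + w (-1) 1 + w 1 (-1) + w (-1) (-1) + w 1 1

-- ===== PRECONDITION & SPEC =====
-- Pre_ is the natural domain: a nonempty grid that either has no diagonal neighbours at all
-- (fewer than 2 rows or 2 columns, where A returns 1 for any r, c) or is rectangular with
-- (r, c) an in-range cell. It excludes some inputs where A still returns (negative indices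
-- that Python wraps around, and ragged rows): there A's value is an accident of index
-- wraparound, and B may raise or count along different cells.
def Pre_diag_size (r : Int) (c : Int) (data : List (List String)) : Prop :=
  data ≠ [] ∧
  ((data.length ≤ 1 ∨ (data.headI).length ≤ 1) ∨
   ((∀ row ∈ data, row.length = (data.headI).length) ∧
    0 ≤ r ∧ r < data.length ∧ 0 ≤ c ∧ c < (data.headI).length))
instance (r : Int) (c : Int) (data : List (List String)) : Decidable (Pre_diag_size r c data) := by
  unfold Pre_diag_size; infer_instance

def pvWitness_diag_size : Int × Int × List (List String) := (0, 0, [["a"]])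

def Spec_diag_size (r : Int) (c : Int) (data : List (List String)) (out : Int) : Prop := out = diag_size_alt r c data
instance (r : Int) (c : Int) (data : List (List String)) (out : Int) : Decidable (Spec_diag_size r c data out) := by unfold Spec_diag_size; infer_instance

-- ===== CLAIM (what is proved, stated in full; the proofs are below) =====
def Claim_equal_diag_size : Prop := ∀ (r : Int) (c : Int) (data : List (List String)), Dom_diag_size r c data → Pre_diag_size r c data → Spec_diag_size r c data (diag_size r c data)

-- ===== LEMMAS AND PROOFS =====

-- A's four guards, as functions of the loop index i
def pvG0 (_rows cols r c : Int) (data : List (List String)) (i : Int) : Bool :=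
  decide (r - i ≥ 0) && decide (c + i < cols) && (pvCell data (r - i) (c + i) == pvCell data r c)
def pvG1 (rows _cols r c : Int) (data : List (List String)) (i : Int) : Bool :=
  decide (r + i < rows) && decide (c - i ≥ 0) && (pvCell data (r + i) (c - i) == pvCell data r c)
def pvG2 (_rows _cols r c : Int) (data : List (List String)) (i : Int) : Bool :=
  decide (r - i ≥ 0) && decide (c - i ≥ 0) && (pvCell data (r - i) (c - i) == pvCell data r c)
def pvG3 (rows cols r c : Int) (data : List (List String)) (i : Int) : Bool :=
  decide (r + i < rows) && decide (c + i < cols) && (pvCell data (r + i) (c + i) == pvCell data r c)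

-- B's guard along direction (dr, dc), as a function of the step index i
def pvH (rows cols r c dr dc : Int) (data : List (List String)) (i : Int) : Bool :=
  decide (0 ≤ r + dr * i) && decide (r + dr * i < rows) &&
  decide (0 ≤ c + dc * i) && decide (c + dc * i < cols) &&
  (pvCell data (r + dr * i) (c + dc * i) == pvCell data r c)

-- length of the longest all-true prefix of a guard along a list of indices
def pvPrefix (G : Int → Bool) : List Int → Int
  | [] => 0
  | i :: is => if G i then 1 + pvPrefix G is else 0

def pvCnt (b : Bool) (G : Int → Bool) (is : List Int) : Int :=
  if b then pvPrefix G is else 0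

lemma pvCnt_cons (b : Bool) (G : Int → Bool) (i : Int) (is : List Int) :
    (if b && G i then (1 : Int) else 0) + pvCnt (b && G i) G is = pvCnt b G (i :: is) := by
  cases b <;> cases h : G i <;> simp [pvCnt, pvPrefix, h]

lemma pvPrefix_congr (G H : Int → Bool) (is : List Int) (h : ∀ i ∈ is, G i = H i) :
    pvPrefix G is = pvPrefix H is := by
  induction is with
  | nil => rfl
  | cons i is ih =>
    simp only [pvPrefix, h i (List.mem_cons_self ..)]
    rw [ih fun j hj => h j (List.mem_cons_of_mem _ hj)]

lemma pvStepA_eq (rows cols r c : Int) (data : List (List String))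
    (s : Int) (b0 b1 b2 b3 : Bool) (i : Int) :
    pvStepA rows cols r c data (s, b0, b1, b2, b3) i =
      (s + (if b0 && pvG0 rows cols r c data i then 1 else 0)
         + (if b1 && pvG1 rows cols r c data i then 1 else 0)
         + (if b2 && pvG2 rows cols r c data i then 1 else 0)
         + (if b3 && pvG3 rows cols r c data i then 1 else 0),
       b0 && pvG0 rows cols r c data i, b1 && pvG1 rows cols r c data i,
       b2 && pvG2 rows cols r c data i, b3 && pvG3 rows cols r c data i) := by
  simp only [pvStepA, pvG0, pvG1, pvG2, pvG3]
  cases b0 <;> cases b1 <;> cases b2 <;> cases b3 <;>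
    simp <;> split_ifs <;> simp_all

lemma pvFoldA (rows cols r c : Int) (data : List (List String))
    (is : List Int) (s : Int) (b0 b1 b2 b3 : Bool) :
    (is.foldl (pvStepA rows cols r c data) (s, b0, b1, b2, b3)).1 =
      s + pvCnt b0 (pvG0 rows cols r c data) is + pvCnt b1 (pvG1 rows cols r c data) is
        + pvCnt b2 (pvG2 rows cols r c data) is + pvCnt b3 (pvG3 rows cols r c data) is := by
  induction is generalizing s b0 b1 b2 b3 with
  | nil => simp [pvCnt, pvPrefix]
  | cons i is ih =>
    rw [List.foldl_cons, pvStepA_eq, ih]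
    rw [← pvCnt_cons b0, ← pvCnt_cons b1, ← pvCnt_cons b2, ← pvCnt_cons b3]
    ring

-- B's walk equals the straight-line run of its guard along step indices
def pvRun (H : Int → Bool) : Nat → Int → Int
  | 0, _ => 0
  | f + 1, k => if H k then 1 + pvRun H f (k + 1) else 0

lemma pvWalk_eq_run (data : List (List String)) (rows cols r c dr dc : Int)
    (f : Nat) (k : Int) :
    pvWalk data rows cols (pvCell data r c) dr dc f (r + dr * k) (c + dc * k) =
      pvRun (pvH rows cols r c dr dc data) f k := by
  induction f generalizing k with
  | zero => rfl
  | succ f ih =>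
    show (if _ then _ else _) = (if _ then _ else _)
    rw [show r + dr * k + dr = r + dr * (k + 1) by ring,
        show c + dc * k + dc = c + dc * (k + 1) by ring, ih (k + 1)]
    rfl

lemma pvRun_eq_prefix (H : Int → Bool) (m : Int) (hm : ∀ i, m ≤ i → H i = false) :
    ∀ (f : Nat) (k : Int), (m - k).toNat ≤ f →
      pvRun H f k = pvPrefix H (PySem.List.pyRange k m 1) := by
  intro f
  induction f with
  | zero =>
    intro k hk
    rw [PySem.List.pyRange_one_eq_nil (by omega)]
    rfl
  | succ f ih =>
    intro k hk
    by_cases hkm : k < m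
    · rw [PySem.List.pyRange_one_cons hkm]
      show (if H k then _ else _) = pvPrefix H (k :: _)
      rw [pvPrefix, ih (k + 1) (by omega)]
    · rw [PySem.List.pyRange_one_eq_nil (by omega)]
      show (if H k then _ else _) = (0 : Int)
      rw [hm k (by omega)]
      rfl

-- under Pre_, B's guard agrees with A's at every step index i ≥ 1
lemma pvH_eq_G0 (rows cols r c : Int) (data : List (List String))
    (hr1 : r < rows) (hc0 : 0 ≤ c) (i : Int) (hi : 1 ≤ i) :
    pvH rows cols r c (-1) 1 data i = pvG0 rows cols r c data i := by
  simp only [pvH, pvG0, show r + (-1) * i = r - i by ring, show c + 1 * i = c + i by ring,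
    decide_eq_true (show r - i < rows by omega), decide_eq_true (show (0:Int) ≤ c + i by omega)]
  simp [Bool.and_assoc]

lemma pvH_eq_G1 (rows cols r c : Int) (data : List (List String))
    (hr0 : 0 ≤ r) (hc1 : c < cols) (i : Int) (hi : 1 ≤ i) :
    pvH rows cols r c 1 (-1) data i = pvG1 rows cols r c data i := by
  simp only [pvH, pvG1, show r + 1 * i = r + i by ring, show c + (-1) * i = c - i by ring,
    decide_eq_true (show (0:Int) ≤ r + i by omega), decide_eq_true (show c - i < cols by omega)]
  simp [Bool.and_assoc]

lemma pvH_eq_G2 (rows cols r c : Int) (data : List (List String))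
    (hr1 : r < rows) (hc1 : c < cols) (i : Int) (hi : 1 ≤ i) :
    pvH rows cols r c (-1) (-1) data i = pvG2 rows cols r c data i := by
  simp only [pvH, pvG2, show r + (-1) * i = r - i by ring, show c + (-1) * i = c - i by ring,
    decide_eq_true (show r - i < rows by omega), decide_eq_true (show c - i < cols by omega)]
  simp [Bool.and_assoc]

lemma pvH_eq_G3 (rows cols r c : Int) (data : List (List String))
    (hr0 : 0 ≤ r) (hc0 : 0 ≤ c) (i : Int) (hi : 1 ≤ i) :
    pvH rows cols r c 1 1 data i = pvG3 rows cols r c data i := by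
  simp only [pvH, pvG3, show r + 1 * i = r + i by ring, show c + 1 * i = c + i by ring,
    decide_eq_true (show (0:Int) ≤ r + i by omega), decide_eq_true (show (0:Int) ≤ c + i by omega)]
  simp [Bool.and_assoc]

-- under Pre_, every guard fails at or beyond min rows cols
lemma pvH_false_01 (rows cols r c dr : Int) (data : List (List String))
    (hr0 : 0 ≤ r) (hr1 : r < rows) (hc0 : 0 ≤ c) (hc1 : c < cols)
    (dc : Int) (hdc : dc = 1 ∨ dc = -1) (hdr : dr = 1 ∨ dr = -1)
    (i : Int) (hi : min rows cols ≤ i) :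
    pvH rows cols r c dr dc data i = false := by
  by_cases h1 : 0 ≤ r + dr * i
  · by_cases h2 : r + dr * i < rows
    · have h3 : ¬ (0 ≤ c + dc * i) ∨ ¬ (c + dc * i < cols) := by
        rcases hdc with h | h <;> rcases hdr with h' | h' <;> subst h <;> subst h' <;> omega
      rcases h3 with h3 | h3 <;> simp [pvH, h3]
    · simp [pvH, h2]
  · simp [pvH, h1]

-- ===== VERDICT (by name: the statement is the Claim_ definition above) =====
theorem diag_size_spec : Claim_equal_diag_size := by
  intro r c data _hdom hpre
  obtain ⟨hne, hcase⟩ := hpre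
  unfold Spec_diag_size
  cases data with
  | nil => exact absurd rfl hne
  | cons row rest =>
  simp only [List.headI] at hcase
  have hget0 : PySem.List.pyGet? (row :: rest) 0 = some row := by
    simp [PySem.List.pyGet?, PySem.List.pyIdx?]
  by_cases hsm : (row :: rest).length ≤ 1 ∨ row.length ≤ 1
  · -- a grid with a single row or column: A's loop range is empty, B short-circuits; both give 1
    simp only [diag_size, diag_size_alt, hget0, Option.getD_some]
    rw [PySem.List.pyRange_one_eq_nil (by omega), if_pos (by omega)]
    rfl
  · obtain ⟨hrect, hr0, hr1, hc0, hc1⟩ := hcase.resolve_left hsm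
    simp only [diag_size, diag_size_alt]
    rw [hget0]
    simp only [Option.getD_some]
    rw [if_neg (by omega)]
    set rows : Int := (((row :: rest).length : Nat) : Int) with hrowsdef
    set cols : Int := ((row.length : Nat) : Int) with hcolsdef
    set m : Int := min rows cols with hm
    have hmr : m ≤ rows := min_le_left _ _
    have hmc : m ≤ cols := min_le_right _ _
    have hm1 : 1 ≤ m := by
      have : (0:Int) < rows := by omega
      have : (0:Int) < cols := by omega
      omega
    have hfuel : (m - 1).toNat ≤ (row :: rest).length + 1 := by
      simp only [hrowsdef] at hmr; omega
    -- rewrite B's four walks into prefix counts of A's guards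
    have hwalk : ∀ (dr dc : Int), dr = 1 ∨ dr = -1 → dc = 1 ∨ dc = -1 →
        pvWalk (row :: rest) rows cols (pvCell (row :: rest) r c) dr dc
          ((row :: rest).length + 1) (r + dr) (c + dc) =
        pvPrefix (pvH rows cols r c dr dc (row :: rest)) (PySem.List.pyRange 1 m 1) := by
      intro dr dc hdr hdc
      have := pvWalk_eq_run (row :: rest) rows cols r c dr dc ((row :: rest).length + 1) 1
      rw [show r + dr * 1 = r + dr by ring, show c + dc * 1 = c + dc by ring] at this
      rw [this, pvRun_eq_prefix _ m
        (fun i hi => pvH_false_01 rows cols r c dr (row :: rest) hr0 hr1 hc0 hc1 dc hdc hdr i hi)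
        _ _ hfuel]
    rw [hwalk (-1) 1 (Or.inr rfl) (Or.inl rfl), hwalk 1 (-1) (Or.inl rfl) (Or.inr rfl),
        hwalk (-1) (-1) (Or.inr rfl) (Or.inr rfl), hwalk 1 1 (Or.inl rfl) (Or.inl rfl)]
    rw [pvPrefix_congr _ _ _ (fun i hi => pvH_eq_G0 rows cols r c (row :: rest) hr1 hc0 i
          ((PySem.List.mem_pyRange_one.mp hi).1)),
        pvPrefix_congr _ _ _ (fun i hi => pvH_eq_G1 rows cols r c (row :: rest) hr0 hc1 i
          ((PySem.List.mem_pyRange_one.mp hi).1)),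
        pvPrefix_congr _ _ _ (fun i hi => pvH_eq_G2 rows cols r c (row :: rest) hr1 hc1 i
          ((PySem.List.mem_pyRange_one.mp hi).1)),
        pvPrefix_congr _ _ _ (fun i hi => pvH_eq_G3 rows cols r c (row :: rest) hr0 hc0 i
          ((PySem.List.mem_pyRange_one.mp hi).1))]
    rw [pvFoldA]
    simp [pvCnt]
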